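-- pv_equiv track=rewrite | github.com/achescheir/mystery-word | evil_mystery_word.py | get_all_signatures
-- ===== SOURCE A (Python) =====
-- def get_signature(candidate_word, guesses):
--     signature = []
--     for each_letter in candidate_word:
--         if each_letter in guesses:
--             signature.append(each_letter)
--         else:
--             signature.append('_')
--     return ''.join(signature)
--
-- def get_all_signatures(candidate_word_list,guesses):
--     signatures = {}
--     for each_word in candidate_word_list:
--             signature = get_signature(each_word, guesses)
--             if signature in signatures:
--                 signatures[signature].append(each_word)
--             else:
--                 signatures[signature] = [each_word]
--     return signatures
-- ===== SOURCE B (Python) =====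
-- def get_all_signatures(candidate_word_list, guesses):
--     def sig(w):
--         return ''.join(c if c in guesses else '_' for c in w)
--     sigs = [sig(w) for w in candidate_word_list]
--     order = list(dict.fromkeys(sigs))
--     return {s: [w for w, t in zip(candidate_word_list, sigs) if t == s]
--             for s in order}
-- ===== Notes on version B (the rewrite author's own statement) =====
-- stated objective: alternative
-- what changed: A groups in one pass by appending into a signature-keyed dict; B never maintains growing groups: it precomputes the signature list, dedups it to get the key order, and builds each group by an independent filter pass over the whole word list per distinct signature.
import Mathlib
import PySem

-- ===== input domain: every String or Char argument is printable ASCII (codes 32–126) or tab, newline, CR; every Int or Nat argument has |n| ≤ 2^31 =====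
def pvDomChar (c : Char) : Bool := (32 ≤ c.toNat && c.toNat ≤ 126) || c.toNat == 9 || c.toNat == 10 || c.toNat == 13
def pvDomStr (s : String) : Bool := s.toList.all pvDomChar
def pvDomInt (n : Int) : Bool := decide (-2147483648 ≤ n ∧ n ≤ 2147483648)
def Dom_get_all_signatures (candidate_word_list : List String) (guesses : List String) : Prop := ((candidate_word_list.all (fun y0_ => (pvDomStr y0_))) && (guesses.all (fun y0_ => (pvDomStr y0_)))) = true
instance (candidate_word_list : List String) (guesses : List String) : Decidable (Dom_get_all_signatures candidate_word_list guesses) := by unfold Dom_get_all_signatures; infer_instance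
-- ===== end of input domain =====

-- B replaces A's single-pass append-into-dict grouping by staged passes: compute the signature
-- list, dedup it for the key order, then build each group by a filter pass per distinct
-- signature (objective: alternative; same return value).

-- ===== PORT A =====
-- get_signature: build a list of 1-char strings / "_" and ''.join it
def get_signature (candidate_word : String) (guesses : List String) : String :=
  PySem.Str.join ""
    (candidate_word.toList.foldl
      (fun signature each_letter =>
        if guesses.contains (String.ofList [each_letter]) then signature ++ [String.ofList [each_letter]]
        else signature ++ ["_"])
      [])

def get_all_signatures (candidate_word_list : List String) (guesses : List String) : List (String × List String) :=
  (candidate_word_list.foldl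
    (fun signatures each_word =>
      let signature := get_signature each_word guesses
      if signatures.contains signature then
        signatures.modify signature [] (fun l => l ++ [each_word])   -- signatures[signature].append(each_word)
      else
        signatures.insert signature [each_word])
    PySem.Dict.empty).items

-- ===== PORT B =====
-- B's sig: a char-level map joined directly into a string
def pvSigB (w : String) (guesses : List String) : String :=
  String.ofList (w.toList.map (fun c => if guesses.contains (String.ofList [c]) then c else '_'))

def get_all_signatures_alt (candidate_word_list : List String) (guesses : List String) : List (String × List String) :=
  let sigs := candidate_word_list.map (fun w => pvSigB w guesses)
  let order := PySem.Set.ofList sigs          -- list(dict.fromkeys(sigs)): first occurrences in order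
  order.map (fun s =>
    (s, ((candidate_word_list.zip sigs).filter (fun p => p.2 == s)).map Prod.fst))

-- ===== PRECONDITION & SPEC =====
def Spec_get_all_signatures (candidate_word_list : List String) (guesses : List String) (out : List (String × List String)) : Prop := out = get_all_signatures_alt candidate_word_list guesses
instance (candidate_word_list : List String) (guesses : List String) (out : List (String × List String)) : Decidable (Spec_get_all_signatures candidate_word_list guesses out) := by unfold Spec_get_all_signatures; infer_instance

-- ===== CLAIM (what is proved, stated in full; the proofs are below) =====
def Claim_equal_get_all_signatures : Prop := ∀ (candidate_word_list : List String) (guesses : List String), Dom_get_all_signatures candidate_word_list guesses → Spec_get_all_signatures candidate_word_list guesses (get_all_signatures candidate_word_list guesses)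

-- ===== LEMMAS AND PROOFS =====

-- ''.join of singleton strings is String.ofList of the characters
theorem join_singletons (l : List Char) :
    PySem.Str.join "" (l.map (fun c => String.ofList [c])) = String.ofList l := by
  apply String.toList_injective
  simp only [PySem.Str.toList_join, List.map_map, String.toList_ofList]
  have h1 : (String.toList ∘ fun c => String.ofList [c]) = fun c => [c] := by
    funext c; simp [String.toList_ofList]
  have h2 : ("" : String).toList = [] := by decide
  rw [h1, h2]
  exact PySem.Chars.join_nil_singletons l

-- the two signature computations agree
theorem sig_eq (w : String) (guesses : List String) :
    get_signature w guesses = pvSigB w guesses := by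
  unfold get_signature pvSigB
  have hf : (fun (signature : List String) (c : Char) =>
        if guesses.contains (String.ofList [c]) then signature ++ [String.ofList [c]]
        else signature ++ ["_"])
      = (fun signature c =>
        signature ++ [String.ofList [if guesses.contains (String.ofList [c]) then c else '_']]) := by
    funext s c
    split_ifs <;> rfl
  rw [hf, PySem.List.foldl_append_singleton_eq_map, List.nil_append]
  simpa [List.map_map, Function.comp] using
    join_singletons (w.toList.map (fun c => if guesses.contains (String.ofList [c]) then c else '_'))

-- A's if/else step is exactly a `modify` with default []
theorem step_eq (d : PySem.Dict String (List String)) (s : String) (w : String) :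
    (if d.contains s then d.modify s [] (fun l => l ++ [w]) else d.insert s [w])
      = d.modify s [] (fun l => l ++ [w]) := by
  by_cases h : d.contains s
  · simp [h]
  · simp only [h, Bool.false_eq_true, if_false, PySem.Dict.modify]
    rw [PySem.Dict.getD_of_not_contains _ _ (by simpa using h)]
    simp

-- per-signature group: A's filter over (sig, word) pairs = B's filter over zipped (word, sig) pairs
theorem group_eq (f : String → String) (s : String) (cwl : List String) :
    ((cwl.map (fun w => (f w, w))).filter (fun p => p.1 == s)).map Prod.snd
      = ((cwl.zip (cwl.map f)).filter (fun p => p.2 == s)).map Prod.fst := by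
  induction cwl with
  | nil => rfl
  | cons w t ih =>
    simp only [List.map_cons, List.zip_cons_cons, List.filter_cons]
    by_cases h : f w == s
    · simp [h, ih]
    · simp [h, ih]

theorem main_eq (candidate_word_list : List String) (guesses : List String) :
    get_all_signatures candidate_word_list guesses
      = get_all_signatures_alt candidate_word_list guesses := by
  unfold get_all_signatures get_all_signatures_alt
  have hstep : (fun (signatures : PySem.Dict String (List String)) (each_word : String) =>
        let signature := get_signature each_word guesses
        if signatures.contains signature then
          signatures.modify signature [] (fun l => l ++ [each_word])
        else
          signatures.insert signature [each_word])
      = (fun signatures each_word =>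
          signatures.modify (pvSigB each_word guesses) [] (fun l => l ++ [each_word])) := by
    funext d w
    simpa [sig_eq w guesses] using step_eq d (pvSigB w guesses) w
  rw [hstep]
  dsimp only
  set P := candidate_word_list.map (fun w => (pvSigB w guesses, w)) with hP
  have hfold : candidate_word_list.foldl
      (fun (d : PySem.Dict String (List String)) w =>
        d.modify (pvSigB w guesses) [] (fun l => l ++ [w])) PySem.Dict.empty
      = P.foldl (fun d p => d.modify p.1 [] (fun l => l ++ [p.2])) PySem.Dict.empty := by
    rw [hP, List.foldl_map]
  rw [hfold]
  set DA := P.foldl (fun (d : PySem.Dict String (List String)) p =>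
      d.modify p.1 [] (fun l => l ++ [p.2])) PySem.Dict.empty with hDA
  have hsigs : P.map Prod.fst = candidate_word_list.map (fun w => pvSigB w guesses) := by
    rw [hP, List.map_map]; rfl
  have hAkeys : DA.keys = PySem.Set.ofList (candidate_word_list.map (fun w => pvSigB w guesses)) := by
    rw [hDA]
    have := PySem.Dict.keys_foldl_modify_key P Prod.fst []
      (fun _ p => fun l => l ++ [p.2]) PySem.Dict.empty
    simp only at this
    rw [this, hsigs]
    simp [PySem.Dict.keys_empty, PySem.Set.update, PySem.Set.ofList_eq_foldl]
  have hAnodup : DA.keys.Nodup := by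
    rw [hAkeys]; exact PySem.Set.nodup_ofList _
  rw [PySem.Dict.items_eq_map_keys DA hAnodup [], hAkeys]
  apply List.map_congr_left
  intro s _
  congr 1
  rw [hDA, PySem.Dict.getD_foldl_modify_append, PySem.Dict.getD_empty, List.nil_append, hP]
  exact group_eq (fun w => pvSigB w guesses) s candidate_word_list

-- ===== VERDICT (by name: the statement is the Claim_ definition above) =====
theorem get_all_signatures_spec : Claim_equal_get_all_signatures := by
  intro cwl g _
  exact main_eq cwl g
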